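-- pv_equiv track=rewrite | github.com/PeterL-Engineering/ESC180_Introduction_Computer_Programming | lectures/lecture_8_2.py | luckiest_kid
-- ===== SOURCE A (Python) =====
-- def haul_kid_house(hh, house, kid):
--     '''Return the number of items kid kid collected
--     in house house'''
--     if not kid in hh[house]:
--         return 0
--     else:
--         return len(hh[house][kid])
--
-- def haul_kid(hh, kid):
--     total = 0
--     for house, house_dict in hh.items():
--         total +=haul_kid_house(hh, house, kid)
--     return total
--
-- def luckiest_kid(hh):
--     '''Want to make a dictionary
--     haul[kid] = haul for the kids
--
--     want a list of all the kids
--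
--     To get a list of all the kids, go through
--     each house dict, extract the keys'''
--
--     all_kids = []
--
--     for house, house_dict in hh.items():
--         for kid, haul in house_dict.items():
--             all_kids.append(kid)
--
--     haul = {}
--     for kid in all_kids:
--         haul[kid] = haul_kid(hh, kid)
--
--     cur_luckiest_kid = "Roger"
--     cur_max_items = -1
--     for kid, num_items in haul.items():
--         if cur_max_items < num_items:
--             cur_max_items = num_items
--             cur_luckiest_kid = kid
--     return cur_luckiest_kid
-- ===== SOURCE B (Python) =====
-- def luckiest_kid(hh):
--     # Single pass: accumulate per-kid totals directly, no per-kid rescans of hh.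
--     totals = {}
--     for house_dict in hh.values():
--         for kid, haul in house_dict.items():
--             totals[kid] = totals.get(kid, 0) + len(haul)
--     cur_luckiest_kid = "Roger"
--     cur_max_items = -1
--     for kid, num_items in totals.items():
--         if cur_max_items < num_items:
--             cur_max_items = num_items
--             cur_luckiest_kid = kid
--     return cur_luckiest_kid
-- ===== Notes on version B (the rewrite author's own statement) =====
-- stated objective: faster
-- what changed: B replaces A's kid-list collection plus per-kid full rescans of every house (haul_kid over all houses for each collected kid) with a single pass over hh that accumulates per-kid totals in one dict, keeping the same final max scan.
import Mathlib
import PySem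

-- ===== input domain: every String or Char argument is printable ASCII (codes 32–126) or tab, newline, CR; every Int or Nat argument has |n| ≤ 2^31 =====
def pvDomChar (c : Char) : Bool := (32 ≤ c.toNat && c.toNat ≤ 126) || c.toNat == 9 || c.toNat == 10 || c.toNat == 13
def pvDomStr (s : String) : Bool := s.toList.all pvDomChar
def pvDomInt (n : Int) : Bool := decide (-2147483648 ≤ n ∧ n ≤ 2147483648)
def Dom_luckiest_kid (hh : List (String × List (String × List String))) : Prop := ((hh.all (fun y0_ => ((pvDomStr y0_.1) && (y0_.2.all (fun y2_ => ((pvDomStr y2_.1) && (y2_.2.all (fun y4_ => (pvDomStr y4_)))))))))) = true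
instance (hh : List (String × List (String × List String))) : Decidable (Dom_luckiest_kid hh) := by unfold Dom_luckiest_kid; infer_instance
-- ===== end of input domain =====

-- B replaces A's per-kid full rescans of all houses with a single accumulating pass; same max scan.


-- ===== PORT A =====
def haul_kid_house (hh : List (String × List (String × List String))) (house kid : String) : Int :=
  match (PySem.Dict.mk hh).get? house with
  | none => 0  -- unreachable at A's call sites: house is always a key of hh (Python would raise KeyError)
  | some hd =>
    if ((PySem.Dict.mk hd).contains kid) = false then 0
    else ((PySem.Dict.mk hd).getD kid []).length

def haul_kid (hh : List (String × List (String × List String))) (kid : String) : Int :=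
  hh.foldl (fun total p => total + haul_kid_house hh p.1 kid) 0

def luckiest_kid (hh : List (String × List (String × List String))) : String :=
  let all_kids := hh.foldl (fun acc p => p.2.foldl (fun a q => a ++ [q.1]) acc) ([] : List String)
  let haul := all_kids.foldl (fun d kid => d.insert kid (haul_kid hh kid)) (PySem.Dict.empty : PySem.Dict String Int)
  let r := haul.items.foldl (fun (st : String × Int) p => if st.2 < p.2 then (p.1, p.2) else st) ("Roger", (-1 : Int))
  r.1

-- ===== PORT B =====
def luckiest_kid_alt (hh : List (String × List (String × List String))) : String :=
  let totals := hh.foldl (fun d p => p.2.foldl (fun d' q => d'.modify q.1 0 (· + (q.2.length : Int))) d) (PySem.Dict.empty : PySem.Dict String Int)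
  let r := totals.items.foldl (fun (st : String × Int) p => if st.2 < p.2 then (p.1, p.2) else st) ("Roger", (-1 : Int))
  r.1

-- ===== PRECONDITION & SPEC =====
-- Pre_ excludes association lists with duplicate house keys or duplicate kid keys inside one house:
-- those do not represent Python dicts (every actual Python input has unique keys), so nothing A runs on is excluded.
def Pre_luckiest_kid (hh : List (String × List (String × List String))) : Prop :=
  (hh.map Prod.fst).Nodup ∧ ∀ p ∈ hh, (p.2.map Prod.fst).Nodup
instance (hh : List (String × List (String × List String))) : Decidable (Pre_luckiest_kid hh) := by unfold Pre_luckiest_kid; infer_instance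

def pvWitness_luckiest_kid : (List (String × List (String × List String))) :=
  [("house1", [("alice", ["toy", "candy"]), ("bob", ["rock"])]), ("house2", [("alice", ["pen"])])]

def Spec_luckiest_kid (hh : List (String × List (String × List String))) (out : String) : Prop := out = luckiest_kid_alt hh
instance (hh : List (String × List (String × List String))) (out : String) : Decidable (Spec_luckiest_kid hh out) := by unfold Spec_luckiest_kid; infer_instance

-- ===== CLAIM (what is proved, stated in full; the proofs are below) =====
def Claim_equal_luckiest_kid : Prop := ∀ (hh : List (String × List (String × List String))), Dom_luckiest_kid hh → Pre_luckiest_kid hh → Spec_luckiest_kid hh (luckiest_kid hh)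

-- ===== LEMMAS AND PROOFS =====

theorem pv_witness_ok : Dom_luckiest_kid pvWitness_luckiest_kid ∧ Pre_luckiest_kid pvWitness_luckiest_kid := by
  constructor <;> decide

-- the flattened list of (kid, haul) entries, house by house
def pvPairs (hh : List (String × List (String × List String))) : List (String × List String) :=
  hh.flatMap (·.2)

-- A's all_kids list is the flattened kid list
theorem pv_all_kids (hh : List (String × List (String × List String))) (acc : List String) :
    hh.foldl (fun acc p => p.2.foldl (fun a q => a ++ [q.1]) acc) acc
      = acc ++ (pvPairs hh).map (·.1) := by
  induction hh generalizing acc with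
  | nil => simp [pvPairs]
  | cons p t ih =>
      rw [List.foldl_cons,
        show (p.2.foldl (fun a q => a ++ [q.1]) acc) = acc ++ p.2.map (fun q => q.1) from
          PySem.List.foldl_append_singleton_eq_map _ _ _,
        ih]
      simp [pvPairs, List.flatMap_cons]

-- B's nested fold is a fold over the flattened pairs
theorem pv_totals_flat (hh : List (String × List (String × List String)))
    (g : PySem.Dict String Int → (String × List String) → PySem.Dict String Int)
    (d : PySem.Dict String Int) :
    hh.foldl (fun d p => p.2.foldl g d) d = (pvPairs hh).foldl g d := by
  induction hh generalizing d with
  | nil => simp [pvPairs]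
  | cons p t ih => simp [pvPairs, List.flatMap_cons, List.foldl_append, ih]

-- value of the modify-accumulate fold
theorem pv_getD_modify_sum (l : List (String × List String)) (d : PySem.Dict String Int) (k : String) :
    (l.foldl (fun d q => d.modify q.1 0 (· + (q.2.length : Int))) d).getD k 0
      = d.getD k 0 + ((l.filter (fun q => q.1 == k)).map (fun q => (q.2.length : Int))).sum := by
  induction l generalizing d with
  | nil => simp
  | cons q t ih =>
      simp only [List.foldl_cons, ih, List.filter_cons]
      by_cases h : q.1 = k
      · subst h
        simp only [beq_self_eq_true, if_true, List.map_cons, List.sum_cons,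
          PySem.Dict.getD_modify_self]
        ring
      · have hbe : (q.1 == k) = false := by simpa using h
        rw [PySem.Dict.getD_modify_of_ne _ _ _ (Ne.symm h)]
        simp [hbe]

-- value of an insert fold whose value does not depend on the accumulator
theorem pv_getD_insert_const (l : List String) (v : String → Int) (d : PySem.Dict String Int) (k : String) :
    (l.foldl (fun d x => d.insert x (v x)) d).getD k 0
      = if k ∈ l then v k else d.getD k 0 := by
  induction l generalizing d with
  | nil => simp
  | cons x t ih =>
      simp only [List.foldl_cons, ih, List.mem_cons]
      by_cases hk : k ∈ t
      · simp [hk]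
      · by_cases hx : k = x
        · subst hx; simp [hk, PySem.Dict.getD_insert_self]
        · simp [hk, hx, PySem.Dict.getD_insert_of_ne _ _ _ hx]

-- per-house: A's dict lookup = sum over that house's matching entries (unique keys)
theorem pv_house_sum (kd : List (String × List String)) (k : String)
    (hnd : (kd.map Prod.fst).Nodup) :
    (if ((PySem.Dict.mk kd).contains k) = false then (0 : Int)
     else ((PySem.Dict.mk kd).getD k []).length)
      = ((kd.filter (fun q => q.1 == k)).map (fun q => (q.2.length : Int))).sum := by
  induction kd with
  | nil => simp [PySem.Dict.contains]
  | cons q t ih =>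
      simp only [List.map_cons, List.nodup_cons] at hnd
      simp only [List.filter_cons]
      by_cases h : q.1 = k
      · subst h
        have hq : (t.filter (fun p => p.1 == q.1)) = [] := by
          apply List.filter_eq_nil_iff.mpr
          intro p hp hbe
          have hpe : p.1 = q.1 := by simpa using hbe
          exact hnd.1 (hpe ▸ List.mem_map_of_mem hp)
        simp [PySem.Dict.contains, hq, PySem.Dict.getD, PySem.Dict.get?]
      · have hbe : (q.1 == k) = false := by simpa using h
        simp only [hbe, Bool.false_eq_true, if_false]
        rw [← ih hnd.2]
        simp only [PySem.Dict.contains, PySem.Dict.getD, PySem.Dict.get?]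
        have hfind : List.find? (fun p => p.1 == k) (q :: t) = List.find? (fun p => p.1 == k) t :=
          List.find?_cons_of_neg (by simp [h])
        rw [List.any_cons, hfind, hbe, Bool.false_or]

-- sum over the flattened, filtered pairs = sum over houses of per-house sums
theorem pv_sum_flat (hh : List (String × List (String × List String))) (k : String) :
    (((pvPairs hh).filter (fun q => q.1 == k)).map (fun q => (q.2.length : Int))).sum
      = (hh.map (fun p => ((p.2.filter (fun q => q.1 == k)).map (fun q => (q.2.length : Int))).sum)).sum := by
  induction hh with
  | nil => simp [pvPairs]
  | cons p t ih =>
      simp only [pvPairs, List.flatMap_cons, List.filter_append, List.map_append,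
        List.sum_append, List.map_cons, List.sum_cons]
      rw [show (List.flatMap (fun x => x.2) t) = pvPairs t from rfl, ih]

-- A's haul_kid equals the accumulated total, given unique keys
theorem pv_haul_kid_eq (hh : List (String × List (String × List String))) (k : String)
    (hpre : Pre_luckiest_kid hh) :
    haul_kid hh k
      = (((pvPairs hh).filter (fun q => q.1 == k)).map (fun q => (q.2.length : Int))).sum := by
  obtain ⟨hH, hK⟩ := hpre
  unfold haul_kid
  rw [PySem.List.foldl_congr_mem hh _
      (fun total p => total +
        ((p.2.filter (fun q => q.1 == k)).map (fun q => (q.2.length : Int))).sum) 0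
      (by
        intro acc p hp
        congr 1
        have hget : (PySem.Dict.mk hh).get? p.1 = some p.2 := by
          apply PySem.Dict.get?_of_mem_items
          · simpa [PySem.Dict.items] using hp
          · simpa [PySem.Dict.keys, PySem.Dict.items] using hH
        unfold haul_kid_house
        rw [hget]
        exact pv_house_sum p.2 k (hK p hp))]
  rw [PySem.List.foldl_add, pv_sum_flat]
  simp

-- the two dictionaries agree
theorem pv_dicts_eq (hh : List (String × List (String × List String)))
    (hpre : Pre_luckiest_kid hh) :
    ((pvPairs hh).map (·.1)).foldl (fun d kid => d.insert kid (haul_kid hh kid)) (PySem.Dict.empty : PySem.Dict String Int)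
      = (pvPairs hh).foldl (fun d q => d.modify q.1 0 (· + (q.2.length : Int))) (PySem.Dict.empty : PySem.Dict String Int) := by
  set A := ((pvPairs hh).map (·.1)).foldl (fun d kid => d.insert kid (haul_kid hh kid)) (PySem.Dict.empty : PySem.Dict String Int) with hA
  set B := (pvPairs hh).foldl (fun d q => d.modify q.1 0 (· + (q.2.length : Int))) (PySem.Dict.empty : PySem.Dict String Int) with hB
  have hkA : A.keys = PySem.Set.ofList ((pvPairs hh).map (·.1)) := by
    rw [hA, PySem.Dict.keys_foldl_insert]
    simp [PySem.Set.update_nil_left]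
  have hkB : B.keys = PySem.Set.ofList ((pvPairs hh).map (·.1)) := by
    rw [hB, PySem.Dict.keys_foldl_modify_key]
    simp [PySem.Set.update_nil_left]
  have hndA : A.keys.Nodup := by
    rw [hA]; exact PySem.Dict.nodup_keys_foldl_insert _ _ _ (by simp)
  have hndB : B.keys.Nodup := by
    rw [hB]
    exact PySem.Dict.nodup_keys_foldl_modify_key _ _ _ _ _ (by simp)
  apply PySem.Dict.ext
  rw [PySem.Dict.items_eq_map_keys A hndA 0, PySem.Dict.items_eq_map_keys B hndB 0, hkA, hkB]
  apply List.map_congr_left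
  intro k hk
  have hmem : k ∈ (pvPairs hh).map (·.1) := by
    exact (PySem.Set.mem_ofList _ _).mp hk
  have hAv : A.getD k 0 = haul_kid hh k := by
    rw [hA, pv_getD_insert_const, if_pos hmem]
  have hBv : B.getD k 0
      = (((pvPairs hh).filter (fun q => q.1 == k)).map (fun q => (q.2.length : Int))).sum := by
    rw [hB, pv_getD_modify_sum]; simp
  rw [hAv, hBv, pv_haul_kid_eq hh k hpre]

-- ===== VERDICT (by name: the statement is the Claim_ definition above) =====
theorem luckiest_kid_spec : Claim_equal_luckiest_kid := by
  intro hh _ hpre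
  show luckiest_kid hh = luckiest_kid_alt hh
  simp only [luckiest_kid, luckiest_kid_alt]
  rw [pv_all_kids, pv_totals_flat, List.nil_append, pv_dicts_eq hh hpre]
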